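-- pv_equiv track=rewrite | github.com/LobanMihajlo/ASD_labs | lab4/main.py | connectivity_matrix
-- ===== SOURCE A (Python) =====
-- def connectivity_matrix(matrix):
--     n = len(matrix)
--     connectivity = [[0] * n for _ in range(n)]
--     for i in range(n):
--         for j in range(n):
--             if matrix[i][j] == 1 and matrix[j][i] == 1:
--                 connectivity[i][j] = 1
--     return connectivity
-- ===== SOURCE B (Python) =====
-- def connectivity_matrix(matrix):
--     n = len(matrix)
--     rows = []
--     for i in range(n):
--         mirrored = [rows[j][i] for j in range(i)]
--         upper = [1 if matrix[i][j] == 1 and matrix[j][i] == 1 else 0 for j in range(i, n)]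
--         rows.append(mirrored + upper)
--     return rows
-- ===== Notes on version B (the rewrite author's own statement) =====
-- stated objective: alternative
-- what changed: B never allocates or mutates a zero matrix: it builds the result row by row, copying the already-known lower-triangle entries from the previously built rows (result is symmetric) and computing only the fresh diagonal-and-upper segment of each row, so each unordered pair is tested once.
import Mathlib
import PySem

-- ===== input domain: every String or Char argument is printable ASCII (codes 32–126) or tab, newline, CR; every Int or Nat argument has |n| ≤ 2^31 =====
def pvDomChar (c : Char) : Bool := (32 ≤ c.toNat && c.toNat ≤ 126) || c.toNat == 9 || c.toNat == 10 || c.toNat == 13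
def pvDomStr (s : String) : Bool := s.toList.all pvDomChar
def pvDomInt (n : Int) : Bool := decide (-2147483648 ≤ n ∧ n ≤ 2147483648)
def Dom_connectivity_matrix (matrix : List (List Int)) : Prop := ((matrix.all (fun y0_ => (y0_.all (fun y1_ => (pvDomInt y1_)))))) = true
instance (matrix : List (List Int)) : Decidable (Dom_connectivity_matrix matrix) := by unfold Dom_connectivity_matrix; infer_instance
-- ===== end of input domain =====

-- B exploits the symmetry of the mutual-edge test: it builds the result row by row,
-- copying the already-known lower-triangle entries from the previously built rows and
-- computing only the fresh diagonal-and-upper segment, so each unordered pair is tested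
-- once (objective: alternative algorithm, same asymptotic cost).

-- ===== PORT A =====
-- matrix[i][j]: under Pre_ both indices are in range (i, j come from range(n), rows have ≥ n entries),
-- so the getD defaults are never taken.
def pvMat (matrix : List (List Int)) (i j : Nat) : Int := (matrix.getD i []).getD j 0

def connectivity_matrix (matrix : List (List Int)) : List (List Int) :=
  let n := matrix.length
  let init : List (List Int) := (List.range n).map (fun _ => List.replicate n (0 : Int))
  (List.range n).foldl (fun conn i =>
    (List.range n).foldl (fun conn j =>
      if pvMat matrix i j = 1 ∧ pvMat matrix j i = 1 then
        conn.modify i (fun row => row.set j 1)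
      else conn) conn) init

-- ===== PORT B =====
-- rows[j][i] and matrix[i][j] are in-range reads under Pre_, so the getD defaults are
-- never taken; range(i, n) is List.range' i (n - i).
def connectivity_matrix_alt (matrix : List (List Int)) : List (List Int) :=
  let n := matrix.length
  (List.range n).foldl (fun rows i =>
    let mirrored := (List.range i).map (fun j => (rows.getD j []).getD i 0)
    let upper := (List.range' i (n - i)).map (fun j =>
      if pvMat matrix i j = 1 ∧ pvMat matrix j i = 1 then (1 : Int) else 0)
    rows ++ [mirrored ++ upper]) []

-- ===== PRECONDITION & SPEC =====
-- Both Pythons read matrix[i][j] for all i, j < len(matrix): on a ragged input with some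
-- row shorter than len(matrix) they raise IndexError, so those inputs are excluded.
def Pre_connectivity_matrix (matrix : List (List Int)) : Prop :=
  ∀ row ∈ matrix, matrix.length ≤ row.length
instance (matrix : List (List Int)) : Decidable (Pre_connectivity_matrix matrix) := by
  unfold Pre_connectivity_matrix; infer_instance
def pvWitness_connectivity_matrix : List (List Int) := [[1, 0], [1, 1]]

def Spec_connectivity_matrix (matrix : List (List Int)) (out : List (List Int)) : Prop := out = connectivity_matrix_alt matrix
instance (matrix : List (List Int)) (out : List (List Int)) : Decidable (Spec_connectivity_matrix matrix out) := by unfold Spec_connectivity_matrix; infer_instance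

-- ===== CLAIM (what is proved, stated in full; the proofs are below) =====
def Claim_equal_connectivity_matrix : Prop := ∀ (matrix : List (List Int)), Dom_connectivity_matrix matrix → Pre_connectivity_matrix matrix → Spec_connectivity_matrix matrix (connectivity_matrix matrix)

-- ===== LEMMAS AND PROOFS =====

-- the common normal form: row i, entry j is the mutual-edge indicator
def pvT (matrix : List (List Int)) : List (List Int) :=
  (List.range matrix.length).map (fun i =>
    (List.range matrix.length).map (fun j =>
      if pvMat matrix i j = 1 ∧ pvMat matrix j i = 1 then (1 : Int) else 0))

theorem pvModify_modify {α : Type} (l : List α) (i : Nat) (f g : α → α) :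
    (l.modify i f).modify i g = l.modify i (fun x => g (f x)) := by
  apply List.ext_getElem (by simp [List.length_modify])
  intro k h1 h2
  simp only [List.getElem_modify]
  split_ifs <;> simp_all

-- the inner loop of A only ever touches row i: hoist the modify out of the fold
theorem pvInner_hoist (matrix : List (List Int)) (i : Nat) (js : List Nat)
    (conn : List (List Int)) :
    js.foldl (fun conn j =>
        if pvMat matrix i j = 1 ∧ pvMat matrix j i = 1 then
          conn.modify i (fun row => row.set j 1)
        else conn) conn
    = conn.modify i (fun row =>
        js.foldl (fun row j =>
          if pvMat matrix i j = 1 ∧ pvMat matrix j i = 1 then row.set j 1 else row) row) := by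
  induction js generalizing conn with
  | nil => exact (List.modify_id i conn).symm
  | cons j js ih =>
    by_cases hp : pvMat matrix i j = 1 ∧ pvMat matrix j i = 1
    · simp only [List.foldl_cons, if_pos hp, ih, pvModify_modify]
    · simp only [List.foldl_cons, if_neg hp, ih]

theorem pvRow_length (matrix : List (List Int)) (i : Nat) (js : List Nat) (row : List Int) :
    (js.foldl (fun row j =>
        if pvMat matrix i j = 1 ∧ pvMat matrix j i = 1 then row.set j 1 else row) row).length
    = row.length := by
  induction js generalizing row with
  | nil => rfl
  | cons j js ih => simp only [List.foldl_cons]; split_ifs <;> simp [ih]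

theorem pvRow_getElem (matrix : List (List Int)) (i m k : Nat) (row : List Int)
    (hk : k < row.length) (hk' : k < ((List.range m).foldl (fun row j =>
        if pvMat matrix i j = 1 ∧ pvMat matrix j i = 1 then row.set j 1 else row) row).length) :
    ((List.range m).foldl (fun row j =>
        if pvMat matrix i j = 1 ∧ pvMat matrix j i = 1 then row.set j 1 else row) row)[k]
    = if k < m ∧ pvMat matrix i k = 1 ∧ pvMat matrix k i = 1 then 1 else row[k] := by
  induction m with
  | zero => simp
  | succ m ih =>
    simp only [List.range_succ, List.foldl_append, List.foldl_cons, List.foldl_nil] at hk' ⊢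
    by_cases hp : pvMat matrix i m = 1 ∧ pvMat matrix m i = 1
    · simp only [if_pos hp] at hk' ⊢
      rw [List.getElem_set]
      by_cases hkm : m = k
      · subst hkm; simp [hp]
      · rw [if_neg hkm, ih (by simpa [pvRow_length] using hk)]
        have : (k < m + 1 ∧ pvMat matrix i k = 1 ∧ pvMat matrix k i = 1)
            ↔ (k < m ∧ pvMat matrix i k = 1 ∧ pvMat matrix k i = 1) := by
          constructor <;> rintro ⟨h1, h2⟩ <;> exact ⟨by omega, h2⟩
        rw [if_congr this rfl rfl]
    · simp only [if_neg hp] at hk' ⊢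
      rw [ih hk']
      have : (k < m + 1 ∧ pvMat matrix i k = 1 ∧ pvMat matrix k i = 1)
          ↔ (k < m ∧ pvMat matrix i k = 1 ∧ pvMat matrix k i = 1) := by
        constructor <;> rintro ⟨h1, h2⟩
        · refine ⟨?_, h2⟩
          rcases Nat.lt_succ_iff_lt_or_eq.mp h1 with h | h
          · exact h
          · exact absurd (h ▸ h2) hp
        · exact ⟨by omega, h2⟩
      rw [if_congr this rfl rfl]

theorem pvOuter_length (g : Nat → List Int → List Int) (js : List Nat)
    (init : List (List Int)) :
    (js.foldl (fun c i => c.modify i (g i)) init).length = init.length := by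
  induction js generalizing init with
  | nil => rfl
  | cons j js ih => simp [List.foldl_cons, ih, List.length_modify]

theorem pvOuter_getElem (g : Nat → List Int → List Int) (m k : Nat)
    (init : List (List Int)) (hk : k < init.length)
    (hk' : k < ((List.range m).foldl (fun c i => c.modify i (g i)) init).length) :
    ((List.range m).foldl (fun c i => c.modify i (g i)) init)[k]
    = if k < m then g k init[k] else init[k] := by
  induction m with
  | zero => simp
  | succ m ih =>
    simp only [List.range_succ, List.foldl_append, List.foldl_cons, List.foldl_nil] at hk' ⊢
    rw [List.getElem_modify]
    by_cases hkm : m = k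
    · subst hkm
      rw [if_pos rfl, ih (by simpa [pvOuter_length] using hk),
        if_neg (Nat.lt_irrefl m), if_pos (Nat.lt_succ_self m)]
    · rw [if_neg hkm, ih (by simpa [pvOuter_length] using hk)]
      have : (k < m + 1) ↔ (k < m) := by omega
      rw [if_congr this rfl rfl]

theorem pvA_eq_T (matrix : List (List Int)) : connectivity_matrix matrix = pvT matrix := by
  simp only [connectivity_matrix, pvT]
  simp only [pvInner_hoist]
  have hinitlen : ((List.range matrix.length).map
      (fun _ => List.replicate matrix.length (0 : Int))).length = matrix.length := by simp
  apply List.ext_getElem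
  · rw [pvOuter_length, hinitlen]; simp
  · intro i h1 h2
    have hi : i < matrix.length := by
      have := h1; rwa [pvOuter_length, hinitlen] at this
    rw [pvOuter_getElem _ _ _ _ (by rw [hinitlen]; exact hi) h1, if_pos hi,
      List.getElem_map, List.getElem_map, List.getElem_range]
    apply List.ext_getElem
    · rw [pvRow_length]; simp
    · intro j g1 g2
      have hj : j < matrix.length := by
        have := g1; rwa [pvRow_length, List.length_replicate] at this
      rw [pvRow_getElem _ _ _ _ _ (by simpa using hj) g1, List.getElem_map,
        List.getElem_range, List.getElem_replicate]
      have : (j < matrix.length ∧ pvMat matrix i j = 1 ∧ pvMat matrix j i = 1)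
          ↔ (pvMat matrix i j = 1 ∧ pvMat matrix j i = 1) := by
        constructor
        · rintro ⟨_, h⟩; exact h
        · intro h; exact ⟨hj, h⟩
      rw [if_congr this rfl rfl]

-- ===== B-side machinery: the row-building fold produces the rows of pvT =====

theorem pvRowsB (M : List (List Int)) (n m : Nat) (hm : m ≤ n) :
    (List.range m).foldl (fun rows i =>
      rows ++ [((List.range i).map (fun j => (rows.getD j []).getD i 0)) ++
        ((List.range' i (n - i)).map (fun j =>
          if pvMat M i j = 1 ∧ pvMat M j i = 1 then (1 : Int) else 0))]) []
    = (List.range m).map (fun i => (List.range n).map (fun j =>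
        if pvMat M i j = 1 ∧ pvMat M j i = 1 then (1 : Int) else 0)) := by
  induction m with
  | zero => simp
  | succ m ih =>
    rw [List.range_succ, List.foldl_append, List.foldl_cons, List.foldl_nil, ih (by omega),
      List.map_append]
    congr 1
    have hmir : (List.range m).map (fun j =>
        (((List.range m).map (fun i => (List.range n).map (fun j =>
          if pvMat M i j = 1 ∧ pvMat M j i = 1 then (1 : Int) else 0))).getD j []).getD m 0)
        = (List.range m).map (fun j =>
          if pvMat M m j = 1 ∧ pvMat M j m = 1 then (1 : Int) else 0) := by
      apply List.map_congr_left
      intro j hj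
      have hjm : j < m := List.mem_range.mp hj
      have h1 : (((List.range m).map (fun i => (List.range n).map (fun j =>
            if pvMat M i j = 1 ∧ pvMat M j i = 1 then (1 : Int) else 0))).getD j [])
          = (List.range n).map (fun j' =>
            if pvMat M j j' = 1 ∧ pvMat M j' j = 1 then (1 : Int) else 0) := by
        rw [List.getD_eq_getElem _ _ (by simpa using hjm)]
        simp
      have hsw : (pvMat M j m = 1 ∧ pvMat M m j = 1) ↔ (pvMat M m j = 1 ∧ pvMat M j m = 1) :=
        and_comm
      rw [h1, List.getD_eq_getElem _ _ (by simp; omega), List.getElem_map, List.getElem_range,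
        if_congr hsw rfl rfl]
    rw [hmir]
    have hsplit : List.range n = List.range m ++ List.range' m (n - m) := by
      have h1 := @List.range'_append 0 m (n - m) 1
      simp only [Nat.one_mul, Nat.zero_add] at h1
      rw [show m + (n - m) = n by omega] at h1
      rw [List.range_eq_range', List.range_eq_range', h1]
    simp [hsplit]

theorem pvB_eq_T (matrix : List (List Int)) :
    connectivity_matrix_alt matrix = pvT matrix :=
  pvRowsB matrix matrix.length matrix.length (le_refl _)

-- ===== VERDICT (by name: the statement is the Claim_ definition above) =====
theorem connectivity_matrix_spec : Claim_equal_connectivity_matrix := by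
  intro matrix _ _
  unfold Spec_connectivity_matrix
  rw [pvA_eq_T, pvB_eq_T]
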